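-- pv_equiv track=rewrite | github.com/AdaMartin18010/FormalMath | tools/link_course_mappings.py | split_by_backticks
-- ===== SOURCE A (Python) =====
-- from typing import List, Tuple, Set
--
-- def split_by_backticks(text: str) -> List[Tuple[str, bool]]:
--     """
--     将文本按成对的反引号分割。
--     返回 [(片段, 是否在反引号内), ...]
--     """
--     parts = []
--     current = ""
--     in_backtick = False
--     for char in text:
--         if char == "`":
--             parts.append((current, in_backtick))
--             current = ""
--             in_backtick = not in_backtick
--         else:
--             current += char
--     parts.append((current, in_backtick))
--     return parts
-- ===== SOURCE B (Python) =====
-- def split_by_backticks(text: str) -> list: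
--     """
--     将文本按成对的反引号分割。
--     返回 [(片段, 是否在反引号内), ...]
--     """
--     return [(seg, i % 2 == 1) for i, seg in enumerate(text.split("`"))]
-- ===== Notes on version B (the rewrite author's own statement) =====
-- stated objective: faster
-- what changed: Replaces the character-by-character loop with its toggling in_backtick flag and string accumulator by a single str.split on the backtick character, tagging each segment by its index parity.
import Mathlib
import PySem

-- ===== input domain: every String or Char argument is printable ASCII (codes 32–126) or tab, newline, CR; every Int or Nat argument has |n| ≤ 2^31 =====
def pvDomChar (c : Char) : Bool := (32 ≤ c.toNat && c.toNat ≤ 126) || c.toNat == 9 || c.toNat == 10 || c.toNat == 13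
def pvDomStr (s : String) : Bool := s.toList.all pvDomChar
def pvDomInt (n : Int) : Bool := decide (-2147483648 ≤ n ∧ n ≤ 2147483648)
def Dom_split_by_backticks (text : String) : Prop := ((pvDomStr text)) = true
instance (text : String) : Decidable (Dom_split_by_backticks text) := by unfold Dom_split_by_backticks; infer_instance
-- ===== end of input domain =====

-- B replaces A's character loop / toggling flag by one split on '`' plus index parity (idiomatic rewrite).

-- ===== PORT A =====
-- character loop with accumulator `current` and flag `in_backtick`, as in A
def split_by_backticks (text : String) : List (String × Bool) :=
  let st := text.toList.foldl
    (fun (st : List (String × Bool) × String × Bool) c =>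
      if c = '`' then (st.1 ++ [(st.2.1, st.2.2)], "", !st.2.2)
      else (st.1, st.2.1.push c, st.2.2))
    ([], "", false)
  st.1 ++ [(st.2.1, st.2.2)]

-- ===== PORT B =====
-- hand port of Python's str.split with the one-character separator '`'
-- (exact: ''.split('`') = [''], consecutive/trailing separators give empty segments)
def pySplitTick : List Char → List (List Char)
  | [] => [[]]
  | c :: cs =>
    if c = '`' then [] :: pySplitTick cs
    else
      match pySplitTick cs with
      | [] => [[c]]          -- unreachable: pySplitTick never returns []
      | s :: rest => (c :: s) :: rest

-- [(seg, i % 2 == 1) for i, seg in enumerate(text.split('`'))]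
def split_by_backticks_alt (text : String) : List (String × Bool) :=
  (PySem.List.enumerate ((pySplitTick text.toList).map String.ofList)).map
    (fun p => (p.2, PySem.Int.mod p.1 2 == 1))

-- ===== PRECONDITION & SPEC =====
def Spec_split_by_backticks (text : String) (out : List (String × Bool)) : Prop := out = split_by_backticks_alt text
instance (text : String) (out : List (String × Bool)) : Decidable (Spec_split_by_backticks text out) := by unfold Spec_split_by_backticks; infer_instance

-- ===== CLAIM (what is proved, stated in full; the proofs are below) =====
def Claim_equal_split_by_backticks : Prop := ∀ (text : String), Dom_split_by_backticks text → Spec_split_by_backticks text (split_by_backticks text)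

-- ===== LEMMAS AND PROOFS =====

-- tag a segment list with alternating flags starting at b
def altTag : List String → Bool → List (String × Bool)
  | [], _ => []
  | s :: rest, b => (s, b) :: altTag rest (!b)

def mapHead (f : String → String) : List String → List String
  | [] => []
  | s :: rest => f s :: rest

theorem pySplitTick_ne_nil (cs : List Char) : pySplitTick cs ≠ [] := by
  cases cs with
  | nil => simp [pySplitTick]
  | cons c cs =>
    simp only [pySplitTick]
    split_ifs
    · simp
    · cases h : pySplitTick cs <;> simp

theorem mod_cast_two (k : Nat) : PySem.Int.mod (↑k) 2 = ↑(k % 2) := by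
  simp [PySem.Int.mod, Int.fmod_eq_emod]

theorem tagEnum (xs : List String) (k : Nat) :
    (PySem.List.enumerate xs (↑k)).map (fun p => (p.2, PySem.Int.mod p.1 2 == 1))
      = altTag xs (k % 2 == 1) := by
  induction xs generalizing k with
  | nil => simp [PySem.List.enumerate, altTag]
  | cons s rest ih =>
    have h1 : ((k : Int) + 1) = ((k + 1 : Nat) : Int) := by push_cast; ring
    simp only [PySem.List.enumerate, List.map_cons, altTag, h1, ih (k + 1)]
    refine List.cons_eq_cons.mpr ⟨by rw [mod_cast_two]; simp; omega, ?_⟩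
    congr 1
    rcases Nat.even_or_odd k with he | ho
    · have : k % 2 = 0 := Nat.even_iff.mp he
      have : (k + 1) % 2 = 1 := by omega
      simp_all
    · have : k % 2 = 1 := Nat.odd_iff.mp ho
      have : (k + 1) % 2 = 0 := by omega
      simp_all

theorem push_mk (cur : String) (c : Char) (s : List Char) :
    (cur.push c) ++ String.ofList s = cur ++ String.ofList (c :: s) := by
  rw [← String.toList_inj]
  simp

theorem altTag_mapHead_nilpre (l : List String) (b : Bool) :
    altTag (mapHead (fun s => "" ++ s) l) b = altTag l b := by
  cases l <;> simp [mapHead, altTag]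

theorem loopA (cs : List Char) (acc : List (String × Bool)) (cur : String) (b : Bool) :
    (let st := cs.foldl
        (fun (st : List (String × Bool) × String × Bool) c =>
          if c = '`' then (st.1 ++ [(st.2.1, st.2.2)], "", !st.2.2)
          else (st.1, st.2.1.push c, st.2.2))
        (acc, cur, b);
      st.1 ++ [(st.2.1, st.2.2)])
      = acc ++ altTag (mapHead (fun s => cur ++ s) ((pySplitTick cs).map String.ofList)) b := by
  induction cs generalizing acc cur b with
  | nil =>
    simp [pySplitTick, mapHead, altTag]
  | cons c cs ih =>
    by_cases hc : c = '`'
    · subst hc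
      simp only [List.foldl_cons, reduceIte]
      rw [ih, altTag_mapHead_nilpre]
      simp [pySplitTick, mapHead, altTag]
    · simp only [List.foldl_cons, if_neg hc]
      rw [ih]
      have hne := pySplitTick_ne_nil cs
      rcases h : pySplitTick cs with _ | ⟨s, rest⟩
      · exact absurd h hne
      · simp only [pySplitTick, if_neg hc, h, List.map_cons, mapHead, altTag]
        rw [push_mk]

theorem altB (text : String) :
    split_by_backticks_alt text
      = altTag ((pySplitTick text.toList).map String.ofList) false := by
  unfold split_by_backticks_alt
  have := tagEnum ((pySplitTick text.toList).map String.ofList) 0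
  simpa using this

-- ===== VERDICT (by name: the statement is the Claim_ definition above) =====
theorem split_by_backticks_spec : Claim_equal_split_by_backticks := by
  intro text _
  unfold Spec_split_by_backticks
  rw [altB]
  have h := loopA text.toList [] "" false
  simp only [split_by_backticks]
  rw [h]
  rw [altTag_mapHead_nilpre]
  simp
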